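-- pv_equiv track=rewrite | github.com/jev63/advent-of-code-2022 | src/day_25.py | _fn
-- ===== SOURCE A (Python) =====
-- def _fn(x):
--     if x == 0:
--         return (0,0,0)
--
--     x = int(x)
--     e = -1
--     smaller=True
--     while smaller:
--         block = 5**(e+1)
--         if block <= x:
--             e+=1
--         else:
--             smaller=False
--     c = 0
--     smaller=True
--     while smaller:
--         block = (c+1)*(5**e)
--         if block <= x:
--             c+=1
--         else:
--             smaller=False
--
--     assert c < 5
--     if c == 3:
--         r = -2
--         c = 1
--         e +=1
--     elif c == 4:
--         r = -1
--         c = 1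
--         e+=1
--     else:
--         r = 0
--     return e, c, r
-- ===== SOURCE B (Python) =====
-- def _fn(x):
--     if x == 0:
--         return (0, 0, 0)
--     n = int(x)
--     digits = []
--     while n:
--         digits.append(n % 5)
--         n //= 5
--     e = len(digits) - 1
--     c = digits[-1]
--     if c == 3:
--         return (e + 1, 1, -2)
--     if c == 4:
--         return (e + 1, 1, -1)
--     return (e, c, 0)
-- ===== Notes on version B (the rewrite author's own statement) =====
-- stated objective: simpler
-- what changed: Replaces A's two top-down linear search loops (incrementing the exponent until 5^(e+1) exceeds x, then incrementing the coefficient until (c+1)*5^e exceeds x) with a single bottom-up base-5 digit decomposition via repeated divmod, reading the exponent as len(digits)-1 and the leading digit as digits[-1].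
-- outside the precondition, e.g. on _fn(-3): A returns (-1, 0, 0), B does not finish within the time limit; on _fn(-1): A returns (-1, 0, 0), B does not finish within the time limit
import Mathlib
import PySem

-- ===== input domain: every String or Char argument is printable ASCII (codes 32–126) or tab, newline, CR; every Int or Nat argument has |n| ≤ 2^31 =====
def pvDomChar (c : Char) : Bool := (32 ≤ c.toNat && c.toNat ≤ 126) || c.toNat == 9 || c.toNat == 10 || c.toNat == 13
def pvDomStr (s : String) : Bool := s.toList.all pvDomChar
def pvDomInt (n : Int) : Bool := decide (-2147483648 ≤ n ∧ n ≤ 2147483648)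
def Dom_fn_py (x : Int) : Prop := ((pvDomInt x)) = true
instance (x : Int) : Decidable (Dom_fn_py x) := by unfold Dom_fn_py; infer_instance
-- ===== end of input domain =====

-- B replaces A's two top-down search loops by one bottom-up base-5 divmod decomposition (simpler, same cost).
-- Agreement is about the RETURN value; neither program mutates its argument.

-- ===== PORT A =====
-- first while loop: e starts at -1 and is incremented while 5**(e+1) <= x; we track k = e+1 : Nat
def fnALoopE (x : Int) (k : Nat) : Nat :=
  if (5:Int)^k ≤ x then fnALoopE x (k+1) else k
termination_by (x + 1 - (5:Int)^k).toNat
decreasing_by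
  have h5 : (5:Int)^k < 5^(k+1) := by
    have := pow_lt_pow_right₀ (by norm_num : (1:Int) < 5) (Nat.lt_succ_self k)
    exact this
  have hx : (5:Int)^k ≤ x := by assumption
  have : (0:Int) < x + 1 - 5^k := by omega
  omega

-- 5**e; in Python e = -1 gives the float 0.2, used only in a comparison against a negative x
-- which is false either way; returning 0 there keeps the comparison false identically.
def fnAPow5 (e : Int) : Int := if e < 0 then 0 else (5:Int)^e.toNat

-- second while loop: c incremented while (c+1)*(5**e) <= x.  The extra '0 < p' guard only
-- makes the recursion total: in every reachable state either p > 0 or the comparison is false.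
def fnALoopC (x p : Int) (c : Nat) : Nat :=
  if 0 < p then
    if ((c:Int)+1)*p ≤ x then fnALoopC x p (c+1) else c
  else c
termination_by (x + 1 - ((c:Int)+1)*p).toNat
decreasing_by
  have hp : (0:Int) < p := by assumption
  have hle : ((c:Int)+1)*p ≤ x := by assumption
  simp only [Nat.cast_add, Nat.cast_one]
  have h1 : x + 1 - ((c:Int)+1+1)*p < x + 1 - ((c:Int)+1)*p := by nlinarith
  have h2 : (0:Int) < x + 1 - ((c:Int)+1)*p := by omega
  omega

def fn_py (x : Int) : Int × Int × Int :=
  if x = 0 then (0, 0, 0)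
  else
    let e : Int := (fnALoopE x 0 : Int) - 1
    let c : Int := (fnALoopC x (fnAPow5 e) 0 : Int)
    -- assert c < 5 never fires: for x > 0, c is the leading base-5 digit; for x < 0, c = 0
    if c = 3 then (e + 1, 1, -2)
    else if c = 4 then (e + 1, 1, -1)
    else (e, c, 0)

-- ===== PORT B =====
-- 'while n: digits.append(n % 5); n //= 5'.  For n < 0 the Python loop diverges (outside Pre_);
-- the port's '0 < n' guard terminates there instead.
def fnBDigits (n : Int) (acc : List Int) : List Int :=
  if 0 < n then fnBDigits (PySem.Int.floordiv n 5) (acc ++ [PySem.Int.mod n 5]) else acc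
termination_by n.toNat
decreasing_by
  have hn : (0:Int) < n := by assumption
  have h : PySem.Int.floordiv n 5 = n / 5 := PySem.Int.floordiv_eq_ediv_of_pos (by norm_num)
  rw [h]
  omega

def fn_py_alt (x : Int) : Int × Int × Int :=
  if x = 0 then (0, 0, 0)
  else
    let digits := fnBDigits x []
    let e : Int := (digits.length : Int) - 1
    -- digits[-1]; the default 0 is only reached when digits = [] (x < 0, outside Pre_,
    -- where the Python B raises IndexError after its divergent loop would end)
    let c : Int := (PySem.List.pyGet? digits (-1)).getD 0
    if c = 3 then (e + 1, 1, -2)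
    else if c = 4 then (e + 1, 1, -1)
    else (e, c, 0)

-- ===== PRECONDITION & SPEC =====
-- Pre_ excludes negative inputs, on which A's returned (-1, 0, 0) is leftover loop state
-- while B's 'while n' digit loop does not terminate (SNAFU inputs are nonnegative).
def Pre_fn_py (x : Int) : Prop := 0 ≤ x
instance (x : Int) : Decidable (Pre_fn_py x) := by unfold Pre_fn_py; infer_instance
def pvWitness_fn_py : Int := 2022

def Spec_fn_py (x : Int) (out : Int × Int × Int) : Prop := out = fn_py_alt x
instance (x : Int) (out : Int × Int × Int) : Decidable (Spec_fn_py x out) := by unfold Spec_fn_py; infer_instance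

-- ===== CLAIM (what is proved, stated in full; the proofs are below) =====
def Claim_equal_fn_py : Prop := ∀ (x : Int), Dom_fn_py x → Pre_fn_py x → Spec_fn_py x (fn_py x)

-- ===== LEMMAS AND PROOFS =====

theorem fnBDigits_acc_aux : ∀ (k : Nat) (n : Int), n.toNat ≤ k → ∀ acc,
    fnBDigits n acc = acc ++ fnBDigits n [] := by
  intro k
  induction k with
  | zero =>
    intro n h acc
    have h0 : ¬ (0:Int) < n := by omega
    conv_lhs => rw [fnBDigits]
    conv_rhs => rw [fnBDigits]
    simp [h0]
  | succ k ih =>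
    intro n h acc
    by_cases h0 : (0:Int) < n
    · have hd : PySem.Int.floordiv n 5 = n / 5 := PySem.Int.floordiv_eq_ediv_of_pos (by norm_num)
      have hlt : (n / 5).toNat ≤ k := by omega
      conv_lhs => rw [fnBDigits]
      conv_rhs => rw [fnBDigits]
      rw [if_pos h0, if_pos h0, hd]
      rw [ih _ hlt (acc ++ [PySem.Int.mod n 5]), ih _ hlt ([] ++ [PySem.Int.mod n 5])]
      simp
    · conv_lhs => rw [fnBDigits]
      conv_rhs => rw [fnBDigits]
      simp [h0]

theorem fnBDigits_acc (n : Int) (acc : List Int) :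
    fnBDigits n acc = acc ++ fnBDigits n [] :=
  fnBDigits_acc_aux n.toNat n le_rfl acc

theorem fnBDigits_spec_aux : ∀ (k : Nat) (n : Int), n.toNat ≤ k → 1 ≤ n →
    0 < (fnBDigits n []).length ∧
    (5:Int)^((fnBDigits n []).length - 1) ≤ n ∧
    n < (5:Int)^(fnBDigits n []).length ∧
    (fnBDigits n []).getLast? = some (n / (5:Int)^((fnBDigits n []).length - 1)) := by
  intro k
  induction k with
  | zero => intro n h hn; omega
  | succ k ih =>
    intro n h hn
    have hd : PySem.Int.floordiv n 5 = n / 5 := PySem.Int.floordiv_eq_ediv_of_pos (by norm_num)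
    have hm : PySem.Int.mod n 5 = n % 5 := PySem.Int.mod_eq_emod_of_pos (by norm_num)
    have hdm : 5 * (n / 5) + n % 5 = n := Int.ediv_add_emod n 5
    have hr0 : 0 ≤ n % 5 := Int.emod_nonneg n (by norm_num)
    have hr5 : n % 5 < 5 := Int.emod_lt_of_pos n (by norm_num)
    rw [fnBDigits]
    simp only [if_pos (show (0:Int) < n by omega), hd, hm, List.nil_append]
    rw [fnBDigits_acc]
    by_cases h5 : n < 5
    · have hq : n / 5 = 0 := Int.ediv_eq_zero_of_lt (by omega) (by omega)
      rw [hq]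
      rw [show fnBDigits 0 [] = [] from by rw [fnBDigits]; simp]
      simp only [List.append_nil, List.length_singleton]
      refine ⟨by omega, ?_, ?_, ?_⟩
      · simpa using hn
      · simpa using h5
      · simp; omega
    · have hq1 : 1 ≤ n / 5 := by omega
      have hqk : (n / 5).toNat ≤ k := by omega
      obtain ⟨hL, hlo, hhi, hlast⟩ := ih (n / 5) hqk hq1
      set d' := fnBDigits (n / 5) [] with hd'
      have hL1 : d'.length - 1 + 1 = d'.length := by omega
      have hpow : (5:Int)^d'.length = 5 * 5^(d'.length - 1) := by
        conv_lhs => rw [← hL1]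
        rw [pow_succ]; ring
      have hpow2 : (5:Int)^(d'.length + 1) = 5 * 5^d'.length := by rw [pow_succ]; ring
      have hne : d' ≠ [] := by intro hh; rw [hh] at hL; simp at hL
      have hlen : ([n % 5] ++ d').length = d'.length + 1 := by simp
      constructor
      · rw [hlen]; omega
      refine ⟨?_, ?_, ?_⟩
      · rw [hlen, show d'.length + 1 - 1 = d'.length from by omega, hpow]; omega
      · rw [hlen, hpow2, hpow]; omega
      · rw [hlen, show d'.length + 1 - 1 = d'.length from by omega]
        rw [List.getLast?_append, hlast, hpow]
        rw [Int.ediv_ediv_of_nonneg (by norm_num)]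
        simp

theorem fnBDigits_spec (n : Int) (hn : 1 ≤ n) :
    0 < (fnBDigits n []).length ∧
    (5:Int)^((fnBDigits n []).length - 1) ≤ n ∧
    n < (5:Int)^(fnBDigits n []).length ∧
    (fnBDigits n []).getLast? = some (n / (5:Int)^((fnBDigits n []).length - 1)) :=
  fnBDigits_spec_aux n.toNat n le_rfl hn

-- A's exponent loop lands at m+1 whenever 5^m ≤ x < 5^(m+1)
theorem fnALoopE_eq_aux (x : Int) (m : Nat) (h1 : (5:Int)^m ≤ x) (h2 : x < (5:Int)^(m+1)) :
    ∀ (j k : Nat), k ≤ m + 1 → m + 1 - k ≤ j → fnALoopE x k = m + 1 := by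
  intro j
  induction j with
  | zero =>
    intro k hk hj
    have : k = m + 1 := by omega
    subst this
    rw [fnALoopE, if_neg (not_le.mpr h2)]
  | succ j ih =>
    intro k hk hj
    by_cases hkm : k = m + 1
    · subst hkm
      rw [fnALoopE, if_neg (not_le.mpr h2)]
    · have hk' : k ≤ m := by omega
      have hle : (5:Int)^k ≤ x :=
        le_trans (pow_le_pow_right₀ (by norm_num : (1:Int) ≤ 5) hk') h1
      rw [fnALoopE, if_pos hle]
      exact ih (k+1) (by omega) (by omega)

theorem fnALoopE_eq (x : Int) (m : Nat) (h1 : (5:Int)^m ≤ x) (h2 : x < (5:Int)^(m+1)) :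
    fnALoopE x 0 = m + 1 :=
  fnALoopE_eq_aux x m h1 h2 (m+1) 0 (by omega) (by omega)

-- A's coefficient loop computes the floor quotient
theorem fnALoopC_eq_aux (x p : Int) (hp : 0 < p) :
    ∀ (j : Nat) (c : Nat), (c:Int) ≤ x / p → (x / p - c).toNat ≤ j →
      (fnALoopC x p c : Int) = x / p := by
  intro j
  induction j with
  | zero =>
    intro c hc hj
    have hc' : x / p = (c:Int) := by omega
    rw [fnALoopC, if_pos hp, if_neg]
    · omega
    · rw [show ((c:Int)+1)*p ≤ x ↔ (c:Int)+1 ≤ x / p from (Int.le_ediv_iff_mul_le hp).symm]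
      omega
  | succ j ih =>
    intro c hc hj
    by_cases hcq : (c:Int) = x / p
    · rw [fnALoopC, if_pos hp, if_neg]
      · omega
      · rw [show ((c:Int)+1)*p ≤ x ↔ (c:Int)+1 ≤ x / p from (Int.le_ediv_iff_mul_le hp).symm]
        omega
    · have hlt : (c:Int) + 1 ≤ x / p := by omega
      rw [fnALoopC, if_pos hp, if_pos]
      · have := ih (c+1) (by push_cast; omega) (by omega)
        rw [this]
      · rw [show ((c:Int)+1)*p ≤ x ↔ (c:Int)+1 ≤ x / p from (Int.le_ediv_iff_mul_le hp).symm]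
        omega

theorem fn_py_eq_alt (x : Int) (hx : 0 ≤ x) : fn_py x = fn_py_alt x := by
  by_cases hx0 : x = 0
  · simp [fn_py, fn_py_alt, hx0]
  · have hx1 : 1 ≤ x := by omega
    obtain ⟨hL, hlo, hhi, hlast⟩ := fnBDigits_spec x hx1
    set d := fnBDigits x [] with hd
    set m : Nat := d.length - 1 with hm
    have hLm : d.length = m + 1 := by omega
    rw [hLm] at hhi
    have hE : fnALoopE x 0 = m + 1 := fnALoopE_eq x m hlo hhi
    have he : (fnALoopE x 0 : Int) - 1 = (m : Int) := by rw [hE]; push_cast; omega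
    have hpow5 : fnAPow5 ((fnALoopE x 0 : Int) - 1) = (5:Int)^m := by
      rw [he, fnAPow5, if_neg (by omega)]
      norm_num
    have hqnn : (0:Int) ≤ x / (5:Int)^m := Int.ediv_nonneg hx (by positivity)
    have hC : (fnALoopC x ((5:Int)^m) 0 : Int) = x / (5:Int)^m :=
      fnALoopC_eq_aux x ((5:Int)^m) (by positivity) (x / (5:Int)^m).toNat 0 (by omega) (by omega)
    have hget : (PySem.List.pyGet? d (-1)).getD 0 = x / (5:Int)^m := by
      rw [PySem.List.pyGet?_neg_one, hlast]
      rfl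
    have hpow5' : fnAPow5 ((m:Nat):Int) = (5:Int)^m := by
      rw [fnAPow5, if_neg (by omega)]
      norm_num
    rw [fn_py, fn_py_alt, if_neg hx0, if_neg hx0]
    simp only [← hd, hget, he, hLm, hpow5', hC]
    rw [show ((m+1:Nat):Int) - 1 = (m:Int) from by push_cast; ring]

-- ===== VERDICT (by name: the statement is the Claim_ definition above) =====
theorem fn_py_spec : Claim_equal_fn_py := by
  intro x hdom hpre
  exact fn_py_eq_alt x hpre
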